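-- pv_equiv track=rewrite | github.com/Dan-jpg2/CSIK_Prog | modul8/v_3_Reduktion/v3_8.py | shortest_of
-- ===== SOURCE A (Python) =====
-- def shortest_of(v):
--     if len(v) == 0:
--         raise ValueError ("Empty vector string")
--     shortest_string = v[0]
--
--     i = 1
--     n = len(v)
--     while i < n:
--         if len(v[i]) < len(shortest_string):
--             shortest_string = v[i]
--         i = i + 1
--     return shortest_string
-- ===== SOURCE B (Python) =====
-- def shortest_of(v):
--     if len(v) == 0:
--         raise ValueError("Empty vector string")
--     return sorted(v, key=len)[0]
-- ===== Notes on version B (the rewrite author's own statement) =====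
-- stated objective: simpler
-- what changed: Replaces the manual index-based while-loop min-scan with a stable length-sort and taking the first element, keeping the explicit empty-list ValueError guard.
import Mathlib
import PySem

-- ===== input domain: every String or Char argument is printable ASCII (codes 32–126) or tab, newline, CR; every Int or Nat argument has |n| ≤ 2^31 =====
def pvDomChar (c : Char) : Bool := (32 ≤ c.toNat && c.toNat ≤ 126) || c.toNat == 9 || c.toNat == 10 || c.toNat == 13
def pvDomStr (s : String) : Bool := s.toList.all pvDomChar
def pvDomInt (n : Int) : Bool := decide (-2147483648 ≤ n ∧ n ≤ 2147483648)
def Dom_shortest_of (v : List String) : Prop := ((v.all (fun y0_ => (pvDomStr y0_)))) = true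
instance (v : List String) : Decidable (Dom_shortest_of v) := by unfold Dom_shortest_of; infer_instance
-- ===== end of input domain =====

-- B replaces A's index-based while-loop min-scan by sorted(v, key=len)[0] (stable sort, first element): simpler, not faster.


-- ===== PORT A =====
-- the while loop: 'while i < n: if len(v[i]) < len(shortest): shortest = v[i]; i += 1'
def shortestGo (v : List String) (shortest : String) (i : Nat) : String :=
  if h : i < v.length then
    shortestGo v (if PySem.Str.len v[i] < PySem.Str.len shortest then v[i] else shortest) (i + 1)
  else shortest
termination_by v.length - i

def shortest_of (v : List String) : String :=
  match v with
  | [] => ""            -- Python: raise ValueError("Empty vector string"); excluded by Pre_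
  | s0 :: _ => shortestGo v s0 1

-- ===== PORT B =====
def shortest_of_alt (v : List String) : String :=
  match v with
  | [] => ""            -- Python: raise ValueError("Empty vector string"); excluded by Pre_
  | _ :: _ => (PySem.List.sorted v (fun s => PySem.Str.len s) false).headD ""

-- ===== PRECONDITION & SPEC =====
-- Pre_ excludes exactly the empty list, on which A raises ValueError.
def Pre_shortest_of (v : List String) : Prop := v ≠ []
instance (v : List String) : Decidable (Pre_shortest_of v) := by unfold Pre_shortest_of; infer_instance
def pvWitness_shortest_of : List String := ["abc", "d", "ef"]

def Spec_shortest_of (v : List String) (out : String) : Prop := out = shortest_of_alt v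
instance (v : List String) (out : String) : Decidable (Spec_shortest_of v out) := by unfold Spec_shortest_of; infer_instance

-- ===== CLAIM (what is proved, stated in full; the proofs are below) =====
def Claim_equal_shortest_of : Prop := ∀ (v : List String), Dom_shortest_of v → Pre_shortest_of v → Spec_shortest_of v (shortest_of v)

-- ===== LEMMAS AND PROOFS =====
-- the common scan step: keep the accumulator unless the new string is strictly shorter
def minStep (a x : String) : String := if PySem.Str.len x < PySem.Str.len a then x else a

lemma shortestGo_eq_foldl_drop (v : List String) (i : Nat) (s : String) :
    shortestGo v s i = (v.drop i).foldl minStep s := by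
  by_cases h : i < v.length
  · rw [shortestGo, dif_pos h,
      shortestGo_eq_foldl_drop v (i + 1),
      List.drop_eq_getElem_cons h, List.foldl_cons]
    rfl
  · rw [shortestGo, dif_neg h, List.drop_eq_nil_of_le (Nat.le_of_not_lt h), List.foldl_nil]
termination_by v.length - i

lemma insertBy_cons {α : Type} (before : α → α → Bool) (x a : α) (acc : List α) :
    PySem.List.insertBy before x (a :: acc) =
      if before x a then x :: a :: acc else a :: PySem.List.insertBy before x acc := rfl

-- head of an insertBy-fold over a nonempty accumulator is the running strict-min scan
lemma headD_foldl_insertBy (t : List String) (a : String) (acc : List String) :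
    (t.foldl (fun acc x =>
        PySem.List.insertBy (fun p q => decide (PySem.Str.len p < PySem.Str.len q)) x acc)
      (a :: acc)).headD "" = t.foldl minStep a := by
  induction t generalizing a acc with
  | nil => rfl
  | cons x t ih =>
    rw [List.foldl_cons, insertBy_cons]
    by_cases h : PySem.Str.len x < PySem.Str.len a
    · rw [if_pos (by simpa using h), ih x (a :: acc)]; rw [List.foldl_cons]; simp only [minStep]; rw [if_pos h]
    · rw [if_neg (by simpa using h), ih a _]; rw [List.foldl_cons]; simp only [minStep]; rw [if_neg h]

-- ===== VERDICT (by name: the statement is the Claim_ definition above) =====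
theorem shortest_of_spec : Claim_equal_shortest_of := by
  intro v _ hpre
  unfold Spec_shortest_of
  match v, hpre with
  | s0 :: t, _ =>
    show shortestGo (s0 :: t) s0 1 = _
    rw [shortestGo_eq_foldl_drop]
    simp only [shortest_of_alt, PySem.List.sorted_eq_foldl_insertBy, List.foldl_cons,
      List.drop_succ_cons, List.drop_zero]
    have := headD_foldl_insertBy t s0 []
    simpa [PySem.List.insertBy] using this.symm
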